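-- pv_equiv track=rewrite | github.com/pypi-data/pypi-mirror-403 | packages/glaip-sdk/glaip_sdk-0.7.25-py3-none-any.whl/glaip_sdk/cli/commands/agents/_common.py | _split_comma_separated_refs
-- ===== SOURCE A (Python) =====
-- def _split_comma_separated_refs(items: tuple[str, ...] | None) -> tuple[str, ...]:
--     """Expand comma-separated CLI values into a flat tuple.
--
--     Click ``multiple=True`` options can be provided as repeated flags (``--tools t1 --tools t2``)
--     or as a single comma-separated value (``--tools t1,t2``). Keep both forms working.
--     """
--     if not items:
--         return ()
--
--     resolved: list[str] = []
--     for item in items: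
--         if item is None:
--             continue
--         for part in str(item).split(","):
--             cleaned = part.strip()
--             if cleaned:
--                 resolved.append(cleaned)
--     return tuple(resolved)
-- ===== SOURCE B (Python) =====
-- def _split_comma_separated_refs(items):
--     """Expand comma-separated CLI values into a flat tuple (join-once, split-once)."""
--     if not items:
--         return ()
--     joined = ",".join(str(i) for i in items if i is not None)
--     return tuple(c for c in (part.strip() for part in joined.split(",")) if c)
-- ===== Notes on version B (the rewrite author's own statement) =====
-- stated objective: simpler
-- what changed: B joins all items into one comma-separated string and splits/strips/filters it in a single pass, replacing A's nested loop (outer over items, inner over each item's comma parts) and its explicit accumulator.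
import Mathlib
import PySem

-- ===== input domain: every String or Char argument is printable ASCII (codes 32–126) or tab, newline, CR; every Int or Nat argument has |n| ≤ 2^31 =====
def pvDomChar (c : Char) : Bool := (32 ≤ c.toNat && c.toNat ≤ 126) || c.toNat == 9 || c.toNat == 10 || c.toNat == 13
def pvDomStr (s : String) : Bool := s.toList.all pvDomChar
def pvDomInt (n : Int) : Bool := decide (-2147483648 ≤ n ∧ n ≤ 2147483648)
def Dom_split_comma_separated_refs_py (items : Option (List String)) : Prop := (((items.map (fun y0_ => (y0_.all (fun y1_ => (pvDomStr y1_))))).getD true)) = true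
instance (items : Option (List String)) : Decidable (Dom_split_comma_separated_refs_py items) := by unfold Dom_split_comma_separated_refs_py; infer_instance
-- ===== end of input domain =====

-- B builds one comma-joined string and splits/strips/filters it once, replacing A's nested loop; objective: simpler.


-- ===== PORT A =====
-- outer loop over items, inner loop over the comma-parts of each item, appending stripped non-empty parts
def split_comma_separated_refs_py (items : Option (List String)) : List String :=
  match items with
  | none => []
  | some l =>
    if l = [] then []
    else
      l.foldl (fun resolved item =>
        (PySem.Chars.splitOn item.toList [',']).foldl
          (fun resolved part =>
            let cleaned := PySem.Chars.strip part
            if cleaned ≠ [] then resolved ++ [String.ofList cleaned] else resolved)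
          resolved) []

-- ===== PORT B =====
-- join all items with "," once, split that single string once, strip, keep the non-empty fragments
def split_comma_separated_refs_py_alt (items : Option (List String)) : List String :=
  match items with
  | none => []
  | some l =>
    if l = [] then []
    else
      (((PySem.Chars.splitOn (PySem.Chars.join [','] (l.map String.toList)) [',']).map
          PySem.Chars.strip).filter (· ≠ [])).map String.ofList

-- ===== PRECONDITION & SPEC =====
def Spec_split_comma_separated_refs_py (items : Option (List String)) (out : List String) : Prop := out = split_comma_separated_refs_py_alt items
instance (items : Option (List String)) (out : List String) : Decidable (Spec_split_comma_separated_refs_py items out) := by unfold Spec_split_comma_separated_refs_py; infer_instance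

-- ===== CLAIM (what is proved, stated in full; the proofs are below) =====
def Claim_equal_split_comma_separated_refs_py : Prop := ∀ (items : Option (List String)), Dom_split_comma_separated_refs_py items → Spec_split_comma_separated_refs_py items (split_comma_separated_refs_py items)

-- ===== LEMMAS AND PROOFS =====

-- PySem's fuel-based comma split is List.splitOnP (· == ',')
theorem pv_go_spec : ∀ (fuel : Nat) (l cur : List Char) (acc : List (List Char)), l.length < fuel →
    PySem.Chars.splitOn.go [','] fuel l cur acc
      = acc.reverse ++ (l.splitOnP (· == ',')).modifyHead (cur.reverse ++ ·) := by
  intro fuel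
  induction fuel with
  | zero => intro l cur acc h; omega
  | succ n ih =>
    intro l cur acc h
    cases l with
    | nil =>
      rw [PySem.Chars.splitOn.go.eq_def]
      simp [List.splitOnP_nil]
    | cons c rest =>
      rw [PySem.Chars.splitOn.go.eq_def]
      simp only [List.length_cons] at h
      by_cases hc : c = ','
      · subst hc
        simp only [List.isPrefixOf, Bool.and_true, beq_self_eq_true, if_pos]
        rw [ih _ _ _ (by simpa using Nat.lt_of_succ_lt_succ h)]
        simp only [List.splitOnP_cons, beq_self_eq_true, if_true]
        rcases hsp : rest.splitOnP (· == ',') with _ | ⟨x, xs⟩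
        · exact absurd hsp (List.splitOnP_ne_nil _ _)
        · simp [hsp]
      · have hpre : List.isPrefixOf [','] (c :: rest) = false := by
          simp only [List.isPrefixOf, Bool.and_true, beq_eq_false_iff_ne, ne_eq]
          exact fun h' => hc h'.symm
        simp only [hpre, Bool.false_eq_true, if_false]
        rw [ih _ _ _ (by omega)]
        simp only [List.splitOnP_cons, show (c == ',') = false by simp [hc], Bool.false_eq_true, if_false]
        rcases hsp : rest.splitOnP (· == ',') with _ | ⟨x, xs⟩
        · exact absurd hsp (List.splitOnP_ne_nil _ _)
        · simp

theorem pv_splitOn_eq (cs : List Char) :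
    PySem.Chars.splitOn cs [','] = cs.splitOnP (· == ',') := by
  rw [PySem.Chars.splitOn, pv_go_spec _ _ _ _ (by omega)]
  rcases hsp : cs.splitOnP (· == ',') with _ | ⟨x, xs⟩
  · exact absurd hsp (List.splitOnP_ne_nil _ _)
  · simp

-- a comma boundary splits cleanly
theorem pv_splitOnP_append (a b : List Char) :
    (a ++ ',' :: b).splitOnP (· == ',') = a.splitOnP (· == ',') ++ b.splitOnP (· == ',') := by
  induction a with
  | nil => simp [List.splitOnP_cons, List.splitOnP_nil]
  | cons c a ih =>
    by_cases hc : (c == ',') = true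
    · simp [List.splitOnP_cons, hc, ih]
    · simp only [List.cons_append, List.splitOnP_cons, hc, ih]
      rcases h : a.splitOnP (· == ',') with _ | ⟨x, xs⟩
      · exact absurd h (List.splitOnP_ne_nil _ _)
      · simp

-- splitting the comma-join flattens to the item-wise splits
theorem pv_split_join (ls : List (List Char)) (h : ls ≠ []) :
    (PySem.Chars.join [','] ls).splitOnP (· == ',')
      = ls.flatMap (fun cs => cs.splitOnP (· == ',')) := by
  induction ls with
  | nil => exact absurd rfl h
  | cons x ls ih =>
    cases ls with
    | nil => simp [PySem.Chars.join, List.intercalate]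
    | cons y ys =>
      have : PySem.Chars.join [','] (x :: y :: ys) = x ++ ',' :: PySem.Chars.join [','] (y :: ys) := by
        simp [PySem.Chars.join, List.intercalate, List.intersperse]
      rw [this, pv_splitOnP_append, ih (by simp)]
      simp

-- A's inner loop characterized
theorem pv_inner (parts : List (List Char)) (acc : List String) :
    parts.foldl (fun resolved part =>
        let cleaned := PySem.Chars.strip part
        if cleaned ≠ [] then resolved ++ [String.ofList cleaned] else resolved) acc
      = acc ++ (((parts.map PySem.Chars.strip).filter (· ≠ [])).map String.ofList) := by
  induction parts generalizing acc with
  | nil => simp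
  | cons p ps ih =>
    rw [List.foldl_cons, ih]
    by_cases hp : PySem.Chars.strip p = [] <;> simp [hp]

-- A's outer loop characterized
theorem pv_outer (l : List String) (acc : List String) :
    l.foldl (fun resolved item =>
        (PySem.Chars.splitOn item.toList [',']).foldl
          (fun resolved part =>
            let cleaned := PySem.Chars.strip part
            if cleaned ≠ [] then resolved ++ [String.ofList cleaned] else resolved)
          resolved) acc
      = acc ++ l.flatMap (fun item =>
          (((PySem.Chars.splitOn item.toList [',']).map PySem.Chars.strip).filter (· ≠ [])).map String.ofList) := by
  induction l generalizing acc with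
  | nil => simp
  | cons x xs ih =>
    rw [List.foldl_cons, pv_inner, ih]
    simp

-- ===== VERDICT (by name: the statement is the Claim_ definition above) =====
theorem split_comma_separated_refs_py_spec : Claim_equal_split_comma_separated_refs_py := by
  intro items _
  unfold Spec_split_comma_separated_refs_py split_comma_separated_refs_py split_comma_separated_refs_py_alt
  cases items with
  | none => rfl
  | some l =>
    by_cases hl : l = []
    · simp [hl]
    · simp only [hl, ite_false]
      rw [pv_outer, pv_splitOn_eq, pv_split_join _ (by simpa using hl)]
      simp [List.flatMap_map, List.map_flatMap, List.filter_flatMap, pv_splitOn_eq]
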